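-- pv_equiv track=rewrite | github.com/01m1/Octopus-Command-Line-Utility | main.py | most_recent_and_oldest_readings
-- ===== SOURCE A (Python) =====
-- def most_recent_and_oldest_readings(data):
--     # Iterate through reading dictionaries inside meter dictionary to create a list of all readings
--     all_readings = [(readings[reading]["READING_DATE"], meter_id) for meter_id, readings in data.items()
--                     for reading in readings]
--
--     # No need to check if file has readings as notes say to assume file conforms to the schema supplied.
--     newest_date = max(all_readings)[0]
--     oldest_date = min(all_readings)[0]
--     # Check for multiple occurrences of values
--     newest_meter_ids = find_occurrences(data, 'READING_DATE', newest_date)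
--     oldest_meter_ids = find_occurrences(data, 'READING_DATE', oldest_date)
--     return newest_date, newest_meter_ids, oldest_date, oldest_meter_ids
--
-- def find_occurrences(data, key, value):
--     # Go through whole dictionary of dictionaries to check for multiple occurrences of a value under a certain key
--     return [reading_id for meter_id, values in data.items()
--             for reading_id in values if values[reading_id][key] == value]
-- ===== SOURCE B (Python) =====
-- def most_recent_and_oldest_readings(data):
--     # One pass: group reading_ids by their READING_DATE, then two key lookups.
--     date_index = {}
--     for meter_id, readings in data.items():
--         for reading_id, values in readings.items():
--             date_index.setdefault(values["READING_DATE"], []).append(reading_id)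
--     newest_date = max(date_index)
--     oldest_date = min(date_index)
--     return newest_date, date_index[newest_date], oldest_date, date_index[oldest_date]
-- ===== Notes on version B (the rewrite author's own statement) =====
-- stated objective: faster
-- what changed: Instead of building a (date, meter_id) list, taking max/min, and rescanning the whole structure twice with find_occurrences, B groups reading_ids by READING_DATE in one pass into a dict and answers with max/min over its keys plus two lookups; Pre_ excludes inputs where A raises (no readings at all -> ValueError from max, or a reading without a 'READING_DATE' key -> KeyError) and association lists with duplicate keys at some level, which do not represent any Python dict.
import Mathlib
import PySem

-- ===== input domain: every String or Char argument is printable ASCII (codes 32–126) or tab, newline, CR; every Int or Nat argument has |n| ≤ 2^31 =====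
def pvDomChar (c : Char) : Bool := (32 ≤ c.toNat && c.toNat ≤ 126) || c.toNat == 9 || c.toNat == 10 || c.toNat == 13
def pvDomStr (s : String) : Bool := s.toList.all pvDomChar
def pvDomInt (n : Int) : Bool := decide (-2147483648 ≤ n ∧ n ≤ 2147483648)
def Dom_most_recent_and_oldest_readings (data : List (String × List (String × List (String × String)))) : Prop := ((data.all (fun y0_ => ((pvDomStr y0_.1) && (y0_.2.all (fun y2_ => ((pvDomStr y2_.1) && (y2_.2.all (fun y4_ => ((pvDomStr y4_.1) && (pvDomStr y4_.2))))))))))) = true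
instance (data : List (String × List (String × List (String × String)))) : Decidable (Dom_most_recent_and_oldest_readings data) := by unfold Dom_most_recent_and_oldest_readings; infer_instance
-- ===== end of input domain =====

-- B replaces A's build-list + max/min + two full find_occurrences rescans by a single
-- grouping pass (date -> reading_ids dict) and two key lookups.


-- ===== PORT A =====
-- helper of A: [reading_id for meter_id, values in data.items() for reading_id in values
--               if values[reading_id][key] == value]
-- dict lookups ported with Dict.getD (the KeyError case is excluded by Pre_)
def pv_find_occurrences (data : List (String × List (String × List (String × String))))
    (key value : String) : List String :=
  data.flatMap (fun mv =>
    (mv.2.filter (fun r =>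
      ((PySem.Dict.mk ((PySem.Dict.mk mv.2).getD r.1 [])).getD key "") == value)).map (fun r => r.1))

def most_recent_and_oldest_readings (data : List (String × List (String × List (String × String)))) : String × List String × String × List String :=
  let all_readings : List (String × String) :=
    data.flatMap (fun mv => mv.2.map (fun r =>
      ((PySem.Dict.mk ((PySem.Dict.mk mv.2).getD r.1 [])).getD "READING_DATE" "", mv.1)))
  -- max/min over the (date, meter_id) tuples; the 'none' case is Python's ValueError, excluded
  -- by Pre_ (the dead default ("","") is never taken under Pre_)
  let newest_date : String :=
    ((PySem.List.max2? all_readings Prod.fst Prod.snd).getD ("", "")).1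
  let oldest_date : String :=
    ((PySem.List.min2? all_readings Prod.fst Prod.snd).getD ("", "")).1
  (newest_date, pv_find_occurrences data "READING_DATE" newest_date,
   oldest_date, pv_find_occurrences data "READING_DATE" oldest_date)

-- ===== PORT B =====
def most_recent_and_oldest_readings_alt (data : List (String × List (String × List (String × String)))) : String × List String × String × List String :=
  let idx : PySem.Dict String (List String) :=
    data.foldl (fun d mv =>
      mv.2.foldl (fun d r =>
        d.modify ((PySem.Dict.mk r.2).getD "READING_DATE" "") [] (fun l => l ++ [r.1])) d)
      PySem.Dict.empty
  -- max/min over the dict's keys; the 'none' case is Python's ValueError, excluded by Pre_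
  let newest : String := (PySem.List.max? idx.keys (fun x => x)).getD ""
  let oldest : String := (PySem.List.min? idx.keys (fun x => x)).getD ""
  (newest, idx.getD newest [], oldest, idx.getD oldest [])

-- ===== PRECONDITION & SPEC =====
-- Pre_ excludes (a) inputs where the Python A raises: no readings at all (ValueError from max)
-- or a reading whose dict lacks the key "READING_DATE" (KeyError); and (b) association lists
-- with duplicate keys at some level, which do not represent any Python dict (dict construction
-- collapses duplicates, so no Python input corresponds to such a list).
def Pre_most_recent_and_oldest_readings (data : List (String × List (String × List (String × String)))) : Prop :=
  (data.map Prod.fst).Nodup ∧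
  (∀ mv ∈ data, (mv.2.map Prod.fst).Nodup ∧
    ∀ r ∈ mv.2, (r.2.map Prod.fst).Nodup ∧ "READING_DATE" ∈ r.2.map Prod.fst) ∧
  data.any (fun mv => !mv.2.isEmpty) = true
instance (data : List (String × List (String × List (String × String)))) : Decidable (Pre_most_recent_and_oldest_readings data) := by unfold Pre_most_recent_and_oldest_readings; infer_instance

def pvWitness_most_recent_and_oldest_readings : (List (String × List (String × List (String × String)))) :=
  [("m1", [("r1", [("READING_DATE", "2020-01-01")])])]

def Spec_most_recent_and_oldest_readings (data : List (String × List (String × List (String × String)))) (out : String × List String × String × List String) : Prop := out = most_recent_and_oldest_readings_alt data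
instance (data : List (String × List (String × List (String × String)))) (out : String × List String × String × List String) : Decidable (Spec_most_recent_and_oldest_readings data out) := by unfold Spec_most_recent_and_oldest_readings; infer_instance

-- ===== CLAIM (what is proved, stated in full; the proofs are below) =====
def Claim_equal_most_recent_and_oldest_readings : Prop := ∀ (data : List (String × List (String × List (String × String)))), Dom_most_recent_and_oldest_readings data → Pre_most_recent_and_oldest_readings data → Spec_most_recent_and_oldest_readings data (most_recent_and_oldest_readings data)

-- ===== LEMMAS AND PROOFS =====

-- the date stored in one reading's value dict
def pvDate (vals : List (String × String)) : String :=
  (PySem.Dict.mk vals).getD "READING_DATE" ""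

-- all (date, reading_id) pairs in encounter order
def pvPairs (data : List (String × List (String × List (String × String)))) : List (String × String) :=
  data.flatMap (fun mv => mv.2.map (fun r => (pvDate r.2, r.1)))

-- lookup of a present key in a nodup association list gives its value
theorem pv_lookup_collapse {rs : List (String × List (String × String))}
    (hnd : (rs.map Prod.fst).Nodup) {r : String × List (String × String)} (hr : r ∈ rs) :
    (PySem.Dict.mk rs).getD r.1 [] = r.2 := by
  have : (r.1, r.2) ∈ (PySem.Dict.mk rs).items := by simpa using hr
  have hk : (PySem.Dict.mk rs).keys.Nodup := by simpa [PySem.Dict.keys_mk] using hnd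
  exact PySem.Dict.getD_of_mem_items _ this hk []

theorem pv_find_occ_eq (data : List (String × List (String × List (String × String))))
    (h : ∀ mv ∈ data, (mv.2.map Prod.fst).Nodup) (v : String) :
    pv_find_occurrences data "READING_DATE" v
      = ((pvPairs data).filter (fun p => p.1 == v)).map Prod.snd := by
  unfold pv_find_occurrences pvPairs
  rw [List.flatMap_congr (g := fun mv =>
    ((mv.2.map (fun r => (pvDate r.2, r.1))).filter (fun p => p.1 == v)).map Prod.snd)]
  · simp only [List.flatMap]
    rw [List.filter_flatten, List.map_flatten]
    simp [List.map_map, Function.comp_def]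
  · intro mv hmv
    rw [List.filter_map]
    rw [List.map_map]
    have : ∀ r ∈ mv.2,
        (((PySem.Dict.mk ((PySem.Dict.mk mv.2).getD r.1 [])).getD "READING_DATE" "") == v)
          = ((fun p => p.1 == v) ∘ fun r => (pvDate r.2, r.1)) r := by
      intro r hr
      simp [pv_lookup_collapse (h mv hmv) hr, pvDate]
    rw [List.filter_congr this]
    rfl

theorem pv_all_readings_eq (data : List (String × List (String × List (String × String))))
    (h : ∀ mv ∈ data, (mv.2.map Prod.fst).Nodup) :
    data.flatMap (fun mv => mv.2.map (fun r =>
      ((PySem.Dict.mk ((PySem.Dict.mk mv.2).getD r.1 [])).getD "READING_DATE" "", mv.1)))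
      = data.flatMap (fun mv => mv.2.map (fun r => (pvDate r.2, mv.1))) := by
  apply List.flatMap_congr
  intro mv hmv
  apply List.map_congr_left
  intro r hr
  simp [pv_lookup_collapse (h mv hmv) hr, pvDate]

-- B's dict, rewritten as a fold over the flattened pair list
theorem pv_idx_eq (data : List (String × List (String × List (String × String)))) :
    data.foldl (fun d mv =>
      mv.2.foldl (fun d r =>
        d.modify ((PySem.Dict.mk r.2).getD "READING_DATE" "") [] (fun l => l ++ [r.1])) d)
      PySem.Dict.empty
      = (pvPairs data).foldl (fun d p => d.modify p.1 [] (fun l => l ++ [p.2])) PySem.Dict.empty := by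
  rw [← List.foldl_flatMap]
  unfold pvPairs
  rw [show data.flatMap (fun mv => mv.2.map (fun r => (pvDate r.2, r.1)))
      = (data.flatMap Prod.snd).map (fun r => (pvDate r.2, r.1)) from by
    rw [List.map_flatMap]]
  rw [List.foldl_map]
  rfl

theorem pv_idx_getD (data : List (String × List (String × List (String × String)))) (v : String) :
    ((pvPairs data).foldl (fun d p => d.modify p.1 [] (fun l => l ++ [p.2]))
      (PySem.Dict.empty : PySem.Dict String (List String))).getD v []
      = ((pvPairs data).filter (fun p => p.1 == v)).map Prod.snd := by
  rw [PySem.Dict.getD_foldl_modify_append]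
  simp [PySem.Dict.getD_empty]

theorem pv_idx_keys (data : List (String × List (String × List (String × String)))) :
    ((pvPairs data).foldl (fun d p => d.modify p.1 [] (fun l => l ++ [p.2]))
      (PySem.Dict.empty : PySem.Dict String (List String))).keys
      = PySem.Set.ofList ((pvPairs data).map Prod.fst) := by
  rw [PySem.Dict.keys_foldl_modify_key (key := Prod.fst) (d0 := []) (f := fun _ p l => l ++ [p.2])]
  rfl

-- first component of the running lexicographic max is the running max of the first components
theorem pv_max2_proj (xs : List (String × String)) (acc : Option (String × String)) :
    Option.map Prod.fst
      (xs.foldl (fun acc x =>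
        match acc with
        | none => some x
        | some m => if (decide (m.1 < x.1) || !decide (x.1 < m.1) && decide (m.2 < x.2)) = true
                    then some x else some m) acc)
      = (xs.map Prod.fst).foldl (fun acc a =>
          match acc with
          | none => some a
          | some m => if m < a then some a else some m) (Option.map Prod.fst acc) := by
  induction xs generalizing acc with
  | nil => rfl
  | cons x t ih =>
    rw [List.map_cons, List.foldl_cons, List.foldl_cons, ih]
    congr 1
    cases acc with
    | none => rfl
    | some m =>
      simp only [Option.map_some]
      by_cases h1 : m.1 < x.1
      · simp [h1]
      · by_cases h2 : x.1 < m.1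
        · simp [h1, h2]
        · have hq : m.1 = x.1 := le_antisymm (le_of_not_gt h2) (le_of_not_gt h1)
          by_cases h3 : m.2 < x.2 <;> simp [h3, hq]

theorem pv_min2_proj (xs : List (String × String)) (acc : Option (String × String)) :
    Option.map Prod.fst
      (xs.foldl (fun acc x =>
        match acc with
        | none => some x
        | some m => if (decide (x.1 < m.1) || !decide (m.1 < x.1) && decide (x.2 < m.2)) = true
                    then some x else some m) acc)
      = (xs.map Prod.fst).foldl (fun acc a =>
          match acc with
          | none => some a
          | some m => if a < m then some a else some m) (Option.map Prod.fst acc) := by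
  induction xs generalizing acc with
  | nil => rfl
  | cons x t ih =>
    rw [List.map_cons, List.foldl_cons, List.foldl_cons, ih]
    congr 1
    cases acc with
    | none => rfl
    | some m =>
      simp only [Option.map_some]
      by_cases h1 : x.1 < m.1
      · simp [h1]
      · by_cases h2 : m.1 < x.1
        · simp [h1, h2]
        · have hq : x.1 = m.1 := le_antisymm (le_of_not_gt h2) (le_of_not_gt h1)
          by_cases h3 : x.2 < m.2 <;> simp [h3, hq]

theorem pv_max2_fst (xs : List (String × String)) :
    Option.map Prod.fst (PySem.List.max2? xs Prod.fst Prod.snd)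
      = PySem.List.max? (xs.map Prod.fst) (fun x => x) := by
  rw [PySem.List.max2?, PySem.List.max?]
  convert pv_max2_proj xs none using 2
  · congr 1
    funext acc x
    cases acc <;> rfl
  · funext acc x
    cases acc <;> rfl

theorem pv_min2_fst (xs : List (String × String)) :
    Option.map Prod.fst (PySem.List.min2? xs Prod.fst Prod.snd)
      = PySem.List.min? (xs.map Prod.fst) (fun x => x) := by
  rw [PySem.List.min2?, PySem.List.min?]
  convert pv_min2_proj xs none using 2
  · congr 1
    funext acc x
    cases acc <;> rfl
  · funext acc x
    cases acc <;> rfl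

theorem pv_getD_fst (o : Option (String × String)) :
    (o.getD ("", "")).1 = (Option.map Prod.fst o).getD "" := by
  cases o <;> rfl

-- max?/min? with the identity key depend only on membership (the extremal VALUE is unique)
theorem pv_max_id_congr {l l' : List String} (hm : ∀ x, x ∈ l ↔ x ∈ l') (hne : l ≠ []) :
    PySem.List.max? l (fun x => x) = PySem.List.max? l' (fun x => x) := by
  have hne' : l' ≠ [] := by
    intro h; subst h
    rcases List.exists_mem_of_ne_nil l hne with ⟨a, ha⟩
    exact absurd ((hm a).mp ha) (by simp)
  rcases Option.ne_none_iff_exists'.mp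
    (fun h => hne ((PySem.List.max?_eq_none_iff l (fun x : String => x)).mp h)) with ⟨a, ha⟩
  rcases Option.ne_none_iff_exists'.mp
    (fun h => hne' ((PySem.List.max?_eq_none_iff l' (fun x : String => x)).mp h)) with ⟨b, hb⟩
  rw [ha, hb]
  have h1 := PySem.List.max?_isMax ha
  have h2 := PySem.List.max?_isMax hb
  have hma := PySem.List.max?_mem ha
  have hmb := PySem.List.max?_mem hb
  exact congrArg some (le_antisymm (h2 a ((hm a).mp hma)) (h1 b ((hm b).mpr hmb)))

theorem pv_min_id_congr {l l' : List String} (hm : ∀ x, x ∈ l ↔ x ∈ l') (hne : l ≠ []) :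
    PySem.List.min? l (fun x => x) = PySem.List.min? l' (fun x => x) := by
  have hne' : l' ≠ [] := by
    intro h; subst h
    rcases List.exists_mem_of_ne_nil l hne with ⟨a, ha⟩
    exact absurd ((hm a).mp ha) (by simp)
  rcases Option.ne_none_iff_exists'.mp
    (fun h => hne ((PySem.List.min?_eq_none_iff l (fun x : String => x)).mp h)) with ⟨a, ha⟩
  rcases Option.ne_none_iff_exists'.mp
    (fun h => hne' ((PySem.List.min?_eq_none_iff l' (fun x : String => x)).mp h)) with ⟨b, hb⟩
  rw [ha, hb]
  have h1 := PySem.List.min?_isMin ha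
  have h2 := PySem.List.min?_isMin hb
  have hma := PySem.List.min?_mem ha
  have hmb := PySem.List.min?_mem hb
  exact congrArg some (le_antisymm (h1 b ((hm b).mpr hmb)) (h2 a ((hm a).mp hma)))

theorem pv_pairs_ne_nil {data : List (String × List (String × List (String × String)))}
    (h : data.any (fun mv => !mv.2.isEmpty) = true) : pvPairs data ≠ [] := by
  rcases List.any_eq_true.mp h with ⟨mv, hmv, hne⟩
  intro hnil
  rcases List.exists_mem_of_ne_nil mv.2 (by simpa using hne) with ⟨r, hr⟩
  have : (pvDate r.2, r.1) ∈ pvPairs data := by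
    unfold pvPairs
    exact List.mem_flatMap.mpr ⟨mv, hmv, List.mem_map.mpr ⟨r, hr, rfl⟩⟩
  rw [hnil] at this
  exact absurd this (by simp)

-- ===== VERDICT (by name: the statement is the Claim_ definition above) =====
theorem most_recent_and_oldest_readings_spec : Claim_equal_most_recent_and_oldest_readings := by
  intro data _ hpre
  obtain ⟨_, hnd, hne⟩ := hpre
  unfold Spec_most_recent_and_oldest_readings
  unfold most_recent_and_oldest_readings most_recent_and_oldest_readings_alt
  dsimp only
  rw [pv_all_readings_eq data (fun mv hmv => (hnd mv hmv).1)]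
  rw [pv_idx_eq data, pv_idx_keys data]
  have hdates : (data.flatMap (fun mv => mv.2.map (fun r => (pvDate r.2, mv.1)))).map Prod.fst
      = (pvPairs data).map Prod.fst := by
    unfold pvPairs
    rw [List.map_flatMap, List.map_flatMap]
    simp [List.map_map, Function.comp_def]
  have hpne : pvPairs data ≠ [] := pv_pairs_ne_nil hne
  have hdne : (pvPairs data).map Prod.fst ≠ [] := by simpa using hpne
  have hmem : ∀ x, x ∈ (pvPairs data).map Prod.fst
      ↔ x ∈ PySem.Set.ofList ((pvPairs data).map Prod.fst) := by
    intro x; rw [PySem.Set.mem_ofList]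
  have hmax :
      (((PySem.List.max2? (data.flatMap (fun mv => mv.2.map (fun r => (pvDate r.2, mv.1))))
        Prod.fst Prod.snd).getD ("", "")).1)
      = (PySem.List.max? (PySem.Set.ofList ((pvPairs data).map Prod.fst)) (fun x => x)).getD "" := by
    rw [pv_getD_fst, pv_max2_fst, hdates, pv_max_id_congr hmem hdne]
  have hmin :
      (((PySem.List.min2? (data.flatMap (fun mv => mv.2.map (fun r => (pvDate r.2, mv.1))))
        Prod.fst Prod.snd).getD ("", "")).1)
      = (PySem.List.min? (PySem.Set.ofList ((pvPairs data).map Prod.fst)) (fun x => x)).getD "" := by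
    rw [pv_getD_fst, pv_min2_fst, hdates, pv_min_id_congr hmem hdne]
  rw [hmax, hmin,
    pv_find_occ_eq data (fun mv hmv => (hnd mv hmv).1),
    pv_find_occ_eq data (fun mv hmv => (hnd mv hmv).1),
    pv_idx_getD, pv_idx_getD]
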